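-- pv_equiv track=rewrite | github.com/CryAndRRich/hustack | leetcode/array/3656_Determine_if_a_Simple_Graph_Exists/codes/erdos.py | simpleGraphExists
-- ===== SOURCE A (Python) =====
-- from typing import List
-- import bisect
--
-- def simpleGraphExists(degrees: List[int]) -> bool:
--     n = len(degrees)
--     degrees.sort(reverse=True)
--
--     total = sum(degrees)
--     if total % 2 == 1:
--         return False
--
--     prefix = [0] * (n + 1)
--     for i in range(n):
--         prefix[i+1] = prefix[i] + degrees[i]
--
--     for k in range(1, n + 1):
--         left = prefix[k]
--         j = bisect.bisect_left(degrees, k, lo=0, hi=n, key=lambda x: -x)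
--         lo, hi = 0, n
--         while lo < hi:
--             mid = (lo + hi) // 2
--             if degrees[mid] >= k:
--                 lo = mid + 1
--             else:
--                 hi = mid
--         j = lo
--
--         right = k * (k - 1)
--         right += k * max(0, j - k)
--         right += prefix[n] - prefix[max(j, k)]
--
--         if left > right:
--             return False
--     return True
-- ===== SOURCE B (Python) =====
-- from typing import List
--
-- def simpleGraphExists(degrees: List[int]) -> bool:
--     # Like A this sorts `degrees` in place (same observable mutation).
--     degrees.sort(reverse=True)
--     n = len(degrees)
--     total = sum(degrees)
--     if total % 2 == 1:
--         return False
--     j = n            # invariant: degrees[j:] are exactly the entries < k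
--     suffix = 0       # sum(degrees[j:])
--     left = 0         # sum(degrees[:k-1]) at top of loop
--     for k in range(1, n + 1):
--         left += degrees[k - 1]
--         while j > 0 and degrees[j - 1] < k:
--             j -= 1
--             suffix += degrees[j]
--         if j >= k:
--             right = k * (k - 1) + k * (j - k) + suffix
--         else:
--             right = k * (k - 1) + total - left
--         if left > right:
--             return False
--     return True
-- ===== Notes on version B (the rewrite author's own statement) =====
-- stated objective: alternative
-- what changed: Replaces A's per-k binary search for the >=k cutoff and precomputed prefix array with a single linear pass after sorting: a monotone pointer tracks the cutoff while running prefix/suffix sums replace prefix-table lookups.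
import Mathlib
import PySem

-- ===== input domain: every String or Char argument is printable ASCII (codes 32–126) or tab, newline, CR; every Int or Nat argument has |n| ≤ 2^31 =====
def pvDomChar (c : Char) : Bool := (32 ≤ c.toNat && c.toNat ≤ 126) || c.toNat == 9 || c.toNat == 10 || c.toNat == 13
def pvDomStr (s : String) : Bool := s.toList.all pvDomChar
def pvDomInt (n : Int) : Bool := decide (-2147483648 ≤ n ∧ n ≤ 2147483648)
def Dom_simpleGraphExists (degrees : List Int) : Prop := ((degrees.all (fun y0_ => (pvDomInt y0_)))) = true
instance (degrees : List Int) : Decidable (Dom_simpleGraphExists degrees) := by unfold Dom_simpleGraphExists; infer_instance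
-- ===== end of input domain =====

-- B replaces A's per-k binary search by a monotone pointer with running prefix/suffix sums
-- (one linear pass after sorting). Both A and B sort `degrees` in place in Python; the
-- equivalence proved here is about the return value.

-- ===== PORT A =====

-- prefix[0]=0; prefix[i+1]=prefix[i]+d[i]  (A's prefix-sum loop, built front to back)
def pyPrefix (d : List Int) (acc : Int) : List Int :=
  match d with
  | [] => [acc]
  | x :: xs => acc :: pyPrefix xs (acc + x)

-- the dead `bisect.bisect_left(..., key=lambda x: -x)` whose result A immediately overwrites:
-- while lo < hi: mid=(lo+hi)//2; if -d[mid] < k: lo=mid+1 else: hi=mid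
def deadBisect (d : List Int) (k : Int) (lo hi : Nat) : Nat :=
  if lo < hi then
    let mid := (lo + hi) / 2
    if -(d.getD mid 0) < k then deadBisect d k (mid + 1) hi else deadBisect d k lo mid
  else lo
termination_by hi - lo
decreasing_by all_goals omega

-- A's manual binary search: while lo < hi: mid=(lo+hi)//2; if d[mid] >= k: lo=mid+1 else: hi=mid
def binSearch (d : List Int) (k : Int) (lo hi : Nat) : Nat :=
  if lo < hi then
    let mid := (lo + hi) / 2
    if k ≤ d.getD mid 0 then binSearch d k (mid + 1) hi else binSearch d k lo mid
  else lo
termination_by hi - lo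
decreasing_by all_goals omega

-- A's main loop: for k in range(1, n+1)
def loopA (d pre : List Int) (n : Nat) (k : Nat) : Bool :=
  if k ≤ n then
    let left := pre.getD k 0
    let _j := deadBisect d (k : Int) 0 n
    let j := binSearch d (k : Int) 0 n
    let right := (k : Int) * ((k : Int) - 1) + (k : Int) * max 0 ((j : Int) - (k : Int))
                   + (pre.getD n 0 - pre.getD (max j k) 0)
    if right < left then false else loopA d pre n (k + 1)
  else true
termination_by n + 1 - k
decreasing_by omega

def simpleGraphExists (degrees : List Int) : Bool :=
  let n := degrees.length
  let d := PySem.List.sorted degrees (fun x => x) true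
  let total := d.sum
  if PySem.Int.mod total 2 == 1 then false
  else loopA d (pyPrefix d 0) n 1

-- ===== PORT B =====

-- B's inner while: while j > 0 and d[j-1] < k: j -= 1; suffix += d[j]
def dropPtr (d : List Int) (k : Int) (j : Nat) (suffix : Int) : Nat × Int :=
  match j with
  | 0 => (0, suffix)
  | j' + 1 =>
    if d.getD j' 0 < k then dropPtr d k j' (suffix + d.getD j' 0)
    else (j' + 1, suffix)

-- B's main loop carrying (j, suffix, left)
def loopB (d : List Int) (n : Nat) (total : Int) (k j : Nat) (suffix left : Int) : Bool :=
  if k ≤ n then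
    let left := left + d.getD (k - 1) 0
    let js := dropPtr d (k : Int) j suffix
    let right := if k ≤ js.1 then
        (k : Int) * ((k : Int) - 1) + (k : Int) * ((js.1 : Int) - (k : Int)) + js.2
      else (k : Int) * ((k : Int) - 1) + total - left
    if right < left then false else loopB d n total (k + 1) js.1 js.2 left
  else true
termination_by n + 1 - k
decreasing_by omega

def simpleGraphExists_alt (degrees : List Int) : Bool :=
  let d := PySem.List.sorted degrees (fun x => x) true
  let n := d.length
  let total := d.sum
  if PySem.Int.mod total 2 == 1 then false
  else loopB d n total 1 n 0 0

-- ===== PRECONDITION & SPEC =====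
def Spec_simpleGraphExists (degrees : List Int) (out : Bool) : Prop := out = simpleGraphExists_alt degrees
instance (degrees : List Int) (out : Bool) : Decidable (Spec_simpleGraphExists degrees out) := by unfold Spec_simpleGraphExists; infer_instance

-- ===== CLAIM (what is proved, stated in full; the proofs are below) =====
def Claim_equal_simpleGraphExists : Prop := ∀ (degrees : List Int), Dom_simpleGraphExists degrees → Spec_simpleGraphExists degrees (simpleGraphExists degrees)

-- ===== LEMMAS AND PROOFS =====

-- cnt d k = number of entries ≥ k
def cnt (d : List Int) (k : Int) : Nat := d.countP (fun x => decide (k ≤ x))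

theorem cnt_le_length (d : List Int) (k : Int) : cnt d k ≤ d.length :=
  List.countP_le_length

theorem cnt_anti (d : List Int) (k k' : Int) (h : k ≤ k') : cnt d k' ≤ cnt d k := by
  apply List.countP_mono_left
  intro x _ hx
  simp only [decide_eq_true_eq] at *
  omega

-- sortedness, index form
def Desc (d : List Int) : Prop := ∀ i j : Nat, (hij : i ≤ j) → (hj : j < d.length) →
  d[j] ≤ d[i]'(Nat.lt_of_le_of_lt hij hj)

theorem desc_of_pairwise (d : List Int) (h : d.Pairwise (fun a b => b ≤ a)) : Desc d := by
  intro i j hij hj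
  rcases Nat.eq_or_lt_of_le hij with rfl | hlt
  · exact le_refl _
  · exact (List.pairwise_iff_getElem.mp h) i j (by omega) hj hlt

-- characterization of cnt on a descending list
theorem cnt_char (d : List Int) (hd : Desc d) (k : Int) (i : Nat) (hi : i < d.length) :
    (k ≤ d[i] ↔ i < cnt d k) := by
  constructor
  · intro hk
    by_contra hc
    push_neg at hc
    have h1 : ∀ a ∈ d.take (i+1), (fun x => decide (k ≤ x)) a = true := by
      intro a ha
      rw [List.mem_take_iff_getElem] at ha
      obtain ⟨j, hj, rfl⟩ := ha
      have := hd j i (by omega) hi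
      simp only [decide_eq_true_eq]
      omega
    have h2 : (d.take (i+1)).countP (fun x => decide (k ≤ x)) = (d.take (i+1)).length :=
      List.countP_eq_length.mpr h1
    have h3 : (d.take (i+1)).length = i + 1 := by
      rw [List.length_take]; omega
    have h4 : cnt d k = (d.take (i+1)).countP (fun x => decide (k ≤ x))
        + (d.drop (i+1)).countP (fun x => decide (k ≤ x)) := by
      unfold cnt
      rw [← List.countP_append, List.take_append_drop]
    omega
  · intro hc
    by_contra hk
    push_neg at hk
    have h1 : ∀ a ∈ d.drop i, (fun x => decide (k ≤ x)) a ≠ true := by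
      intro a ha
      rw [List.mem_drop_iff_getElem] at ha
      obtain ⟨j, hj, rfl⟩ := ha
      have := hd i (i + j) (by omega) (by omega)
      simp only [ne_eq, decide_eq_true_eq]
      omega
    have h2 : (d.drop i).countP (fun x => decide (k ≤ x)) = 0 :=
      List.countP_eq_zero.mpr h1
    have h4 : cnt d k = (d.take i).countP (fun x => decide (k ≤ x))
        + (d.drop i).countP (fun x => decide (k ≤ x)) := by
      unfold cnt
      rw [← List.countP_append, List.take_append_drop]
    have h5 : (d.take i).countP (fun x => decide (k ≤ x)) ≤ i := by
      calc (d.take i).countP (fun x => decide (k ≤ x)) ≤ (d.take i).length :=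
            List.countP_le_length
        _ ≤ i := by rw [List.length_take]; omega
    omega

theorem cnt_ge (d : List Int) (hd : Desc d) (k : Int) (i : Nat) (hi : i < d.length)
    (h : i < cnt d k) : k ≤ d[i] := (cnt_char d hd k i hi).mpr h

theorem cnt_lt (d : List Int) (hd : Desc d) (k : Int) (i : Nat) (hi : i < d.length)
    (h : cnt d k ≤ i) : d[i] < k := by
  by_contra hk
  push_neg at hk
  have := (cnt_char d hd k i hi).mp hk
  omega

-- A's binary search finds cnt
theorem binSearch_eq_cnt (d : List Int) (hd : Desc d) (k : Int) :
    ∀ (m lo hi : Nat), hi - lo = m → lo ≤ cnt d k → cnt d k ≤ hi → hi ≤ d.length →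
    binSearch d k lo hi = cnt d k := by
  intro m
  induction m using Nat.strong_induction_on with
  | _ m ih =>
    intro lo hi hm h1 h2 h3
    rw [binSearch]
    by_cases hlt : lo < hi
    · simp only [if_pos hlt]
      have hmlt : (lo + hi) / 2 < d.length := by omega
      rw [List.getD_eq_getElem d 0 hmlt]
      by_cases hc : k ≤ d[(lo + hi) / 2]
      · simp only [if_pos hc]
        have hcc : (lo + hi) / 2 < cnt d k := (cnt_char d hd k _ hmlt).mp hc
        exact ih (hi - ((lo + hi) / 2 + 1)) (by omega) _ hi rfl (by omega) h2 h3
      · simp only [if_neg hc]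
        have hcle : cnt d k ≤ (lo + hi) / 2 := by
          by_contra hx
          push_neg at hx
          exact hc (cnt_ge d hd k _ hmlt hx)
        exact ih ((lo + hi) / 2 - lo) (by omega) lo _ rfl h1 hcle (by omega)
    · simp only [if_neg hlt]
      omega

-- B's pointer loop lands on cnt and maintains the suffix sum
theorem dropPtr_eq (d : List Int) (hd : Desc d) (k : Int) :
    ∀ j : Nat, cnt d k ≤ j → j ≤ d.length →
    dropPtr d k j ((d.drop j).sum) = (cnt d k, (d.drop (cnt d k)).sum) := by
  intro j
  induction j with
  | zero =>
    intro h1 _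
    have : cnt d k = 0 := by omega
    simp [dropPtr, this]
  | succ j' ih =>
    intro h1 h2
    have hj' : j' < d.length := by omega
    rw [dropPtr]
    rw [List.getD_eq_getElem d 0 hj']
    rcases Nat.lt_or_ge (cnt d k) (j' + 1) with hlt | hge
    · have hdk : d[j'] < k := cnt_lt d hd k j' hj' (by omega)
      simp only [if_pos hdk]
      have hdrop : (d.drop (j' + 1)).sum + d[j'] = (d.drop j').sum := by
        rw [List.drop_eq_getElem_cons hj', List.sum_cons]
        ring
      rw [hdrop]
      exact ih (by omega) (by omega)
    · have hdk : k ≤ d[j'] := cnt_ge d hd k j' hj' (by omega)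
      simp only [if_neg (by omega : ¬ d[j'] < k)]
      have : cnt d k = j' + 1 := by omega
      rw [this]

-- the prefix list built by A: its entries are the partial sums
theorem pyPrefix_getD (d : List Int) :
    ∀ (i : Nat) (acc : Int), i ≤ d.length →
    (pyPrefix d acc).getD i 0 = acc + (d.take i).sum := by
  induction d with
  | nil =>
    intro i acc h
    obtain rfl : i = 0 := by simpa using h
    simp [pyPrefix]
  | cons x xs ih =>
    intro i acc h
    match i with
    | 0 => simp [pyPrefix]
    | i + 1 =>
      simp only [pyPrefix, List.getD_cons_succ, List.take_succ_cons, List.sum_cons]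
      rw [ih i (acc + x) (by simpa using h)]
      ring

-- one-step unfoldings of the two loops
theorem loopA_step (d pre : List Int) (n k : Nat) (h : k ≤ n) :
    loopA d pre n k =
      (if (k : Int) * ((k : Int) - 1)
            + (k : Int) * max 0 ((binSearch d (k : Int) 0 n : Int) - (k : Int))
            + (pre.getD n 0 - pre.getD (max (binSearch d (k : Int) 0 n) k) 0)
          < pre.getD k 0 then false
       else loopA d pre n (k + 1)) := by
  rw [loopA]
  simp only [if_pos h]

theorem loopA_stop (d pre : List Int) (n k : Nat) (h : ¬ k ≤ n) : loopA d pre n k = true := by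
  rw [loopA]
  simp only [if_neg h]

theorem loopB_step (d : List Int) (n : Nat) (total : Int) (k j : Nat) (suffix left : Int)
    (h : k ≤ n) :
    loopB d n total k j suffix left =
      (if (if k ≤ (dropPtr d (k : Int) j suffix).1 then
             (k : Int) * ((k : Int) - 1)
               + (k : Int) * (((dropPtr d (k : Int) j suffix).1 : Int) - (k : Int))
               + (dropPtr d (k : Int) j suffix).2
           else (k : Int) * ((k : Int) - 1) + total - (left + d.getD (k - 1) 0))
          < left + d.getD (k - 1) 0 then false
       else loopB d n total (k + 1) (dropPtr d (k : Int) j suffix).1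
              (dropPtr d (k : Int) j suffix).2 (left + d.getD (k - 1) 0)) := by
  rw [loopB]
  simp only [if_pos h]

theorem loopB_stop (d : List Int) (n : Nat) (total : Int) (k j : Nat) (suffix left : Int)
    (h : ¬ k ≤ n) : loopB d n total k j suffix left = true := by
  rw [loopB]
  simp only [if_neg h]

-- the two main loops agree, given the invariants on B's state
theorem loop_eq (d : List Int) (hd : Desc d) :
    ∀ (k j : Nat), 1 ≤ k → cnt d (k : Int) ≤ j → j ≤ d.length →
    loopA d (pyPrefix d 0) d.length k
      = loopB d d.length d.sum k j ((d.drop j).sum) ((d.take (k - 1)).sum) := by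
  suffices H : ∀ (m k j : Nat), d.length + 1 - k = m → 1 ≤ k → cnt d (k : Int) ≤ j → j ≤ d.length →
      loopA d (pyPrefix d 0) d.length k
        = loopB d d.length d.sum k j ((d.drop j).sum) ((d.take (k - 1)).sum) by
    intro k j hk1 hcj hjn
    exact H (d.length + 1 - k) k j rfl hk1 hcj hjn
  intro m
  induction m using Nat.strong_induction_on with
  | _ m ih =>
  intro k j hm hk1 hcj hjn
  rcases Nat.lt_or_ge d.length k with hkn | hkn
  · rw [loopA_stop _ _ _ _ (by omega), loopB_stop _ _ _ _ _ _ _ (by omega)]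
  · rw [loopA_step _ _ _ _ (by omega), loopB_step _ _ _ _ _ _ _ (by omega)]
    have hk1' : k - 1 < d.length := by omega
    have hleftA : (pyPrefix d 0).getD k 0 = (d.take k).sum := by
      rw [pyPrefix_getD d k 0 (by omega)]
      ring
    have hleftB : (d.take (k - 1)).sum + d.getD (k - 1) 0 = (d.take k).sum := by
      rw [List.getD_eq_getElem d 0 hk1']
      have h2 := List.sum_take_succ d (k - 1) hk1'
      have h1 : k - 1 + 1 = k := by omega
      rw [h1] at h2
      omega
    have hdrop := dropPtr_eq d hd (k : Int) j hcj hjn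
    have hbin := binSearch_eq_cnt d hd (k : Int) d.length 0 d.length rfl (Nat.zero_le _)
      (cnt_le_length d _) (le_refl _)
    have hpn : (pyPrefix d 0).getD d.length 0 = d.sum := by
      rw [pyPrefix_getD d d.length 0 (le_refl _)]
      simp
    have hsumsplit : ∀ m : Nat, (d.drop m).sum = d.sum - (d.take m).sum := by
      intro m
      have h2 : (d.take m).sum + (d.drop m).sum = d.sum := by
        conv_rhs => rw [← List.take_append_drop m d]
        rw [List.sum_append]
      omega
    set c := cnt d (k : Int) with hc
    have hrights :
        (k : Int) * ((k : Int) - 1) + (k : Int) * max 0 ((binSearch d (k : Int) 0 d.length : Int) - (k : Int))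
            + ((pyPrefix d 0).getD d.length 0 - (pyPrefix d 0).getD (max (binSearch d (k : Int) 0 d.length) k) 0)
          = (if k ≤ (dropPtr d (k : Int) j ((d.drop j).sum)).1 then
               (k : Int) * ((k : Int) - 1)
                 + (k : Int) * (((dropPtr d (k : Int) j ((d.drop j).sum)).1 : Int) - (k : Int))
                 + (dropPtr d (k : Int) j ((d.drop j).sum)).2
             else (k : Int) * ((k : Int) - 1) + d.sum - (d.take k).sum) := by
      rw [hdrop, hbin, hpn]
      dsimp only
      rcases Nat.lt_or_ge c k with hck | hck
      · simp only [if_neg (by omega : ¬ k ≤ c)]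
        have h1 : max (0 : Int) ((c : Int) - (k : Int)) = 0 := by omega
        have h2 : max c k = k := by omega
        rw [h1, h2, pyPrefix_getD d k 0 (by omega)]
        ring
      · simp only [if_pos (by omega : k ≤ c)]
        have h1 : max (0 : Int) ((c : Int) - (k : Int)) = (c : Int) - (k : Int) := by omega
        have h2 : max c k = c := by omega
        rw [h1, h2, pyPrefix_getD d c 0 (cnt_le_length d _), hsumsplit c]
        ring
    rw [hleftB, hleftA, hrights]
    refine if_congr Iff.rfl rfl ?_
    rw [hdrop]
    dsimp only
    have hmono : cnt d ((k + 1 : Nat) : Int) ≤ c := by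
      rw [hc]
      apply cnt_anti
      push_cast
      omega
    have := ih (d.length + 1 - (k + 1)) (by omega) (k + 1) c rfl (by omega) hmono
      (cnt_le_length d _)
    simpa using this

-- the Python sort (reverse=True, identity key) yields a descending list
theorem sorted_desc (xs : List Int) : Desc (PySem.List.sorted xs (fun x => x) true) :=
  desc_of_pairwise _ (PySem.List.sorted_pairwise_rev xs (fun x => x))

theorem main_eq (degrees : List Int) :
    simpleGraphExists degrees = simpleGraphExists_alt degrees := by
  simp only [simpleGraphExists, simpleGraphExists_alt]
  have hlen : degrees.length = (PySem.List.sorted degrees (fun x => x) true).length :=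
    (PySem.List.length_sorted degrees _ _).symm
  rw [hlen]
  split
  · rfl
  · have := loop_eq (PySem.List.sorted degrees (fun x => x) true)
      (sorted_desc degrees) 1 (PySem.List.sorted degrees (fun x => x) true).length
      (le_refl _) (cnt_le_length _ _) (le_refl _)
    rw [List.drop_length] at this
    simpa using this

-- ===== VERDICT (by name: the statement is the Claim_ definition above) =====
theorem simpleGraphExists_spec : Claim_equal_simpleGraphExists := by
  intro degrees _
  unfold Spec_simpleGraphExists
  exact main_eq degrees
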